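-- pv_equiv track=rewrite | github.com/dopexthrone/MeaningWorks | mother/journal_patterns.py | find_cross_topic_connections
-- ===== SOURCE A (Python) =====
-- _SERENDIPITY_STOPWORDS = frozenset({
--     "the", "a", "an", "to", "for", "of", "and", "or", "in", "on", "is",
--     "it", "that", "this", "with", "from", "by", "at", "be", "as", "are",
--     "was", "were", "been", "do", "does", "did", "has", "have", "had",
--     "will", "would", "could", "should", "may", "might", "can", "test",
--     "build", "create", "make", "use", "get", "set", "new", "add",
-- })
--
-- def find_cross_topic_connections(topics: list, recent_subjects: list) -> str:
--     """Find unexpected connections between current topics and recurring subjects.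
--     Pure function. Returns a connection insight or empty string.
--     """
--     if not topics or not recent_subjects:
--         return ""
--     topic_words = set()
--     for t in topics:
--         topic_words |= set(t.lower().split()) - _SERENDIPITY_STOPWORDS
--     subject_words = {}
--     for s in recent_subjects:
--         words = set(s.lower().split()) - _SERENDIPITY_STOPWORDS
--         subject_words[s] = words
--     best_subject = ""
--     best_overlap = set()
--     for s, sw in subject_words.items():
--         overlap = topic_words & sw
--         if len(overlap) > len(best_overlap):
--             best_overlap = overlap
--             best_subject = s
--     if not best_overlap:
--         return ""
--     shared = ", ".join(sorted(best_overlap)[:3])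
--     return (
--         f"Unexpected connection: your current work shares themes ({shared}) "
--         f"with a recurring pattern: '{best_subject[:60]}'. Worth exploring?"
--     )
-- ===== SOURCE B (Python) =====
-- _SERENDIPITY_STOPWORDS = frozenset({
--     "the", "a", "an", "to", "for", "of", "and", "or", "in", "on", "is",
--     "it", "that", "this", "with", "from", "by", "at", "be", "as", "are",
--     "was", "were", "been", "do", "does", "did", "has", "have", "had",
--     "will", "would", "could", "should", "may", "might", "can", "test",
--     "build", "create", "make", "use", "get", "set", "new", "add",
-- })
--
--
-- def find_cross_topic_connections(topics: list, recent_subjects: list) -> str: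
--     """Find unexpected connections between current topics and recurring subjects.
--     Pure function. Returns a connection insight or empty string.
--     """
--     if not topics or not recent_subjects:
--         return ""
--     # distinct non-stopword topic words
--     topic_words = {w for t in topics for w in t.lower().split()} - _SERENDIPITY_STOPWORDS
--     # inverted index: word -> positions of the subjects containing it
--     index = {}
--     for i, s in enumerate(recent_subjects):
--         for w in dict.fromkeys(s.lower().split()):
--             index.setdefault(w, []).append(i)
--     # overlap counts per subject position, driven from the topic words through the index
--     counts = {}
--     for w in topic_words:
--         for i in index.get(w, ()):
--             counts[i] = counts.get(i, 0) + 1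
--     best_i = 0
--     for i in range(1, len(recent_subjects)):
--         if counts.get(i, 0) > counts.get(best_i, 0):
--             best_i = i
--     if counts.get(best_i, 0) == 0:
--         return ""
--     best = recent_subjects[best_i]
--     subject_words = set(best.lower().split())
--     shared = ", ".join(sorted(w for w in topic_words if w in subject_words)[:3])
--     return (
--         f"Unexpected connection: your current work shares themes ({shared}) "
--         f"with a recurring pattern: '{best[:60]}'. Worth exploring?"
--     )
-- ===== Notes on version B (the rewrite author's own statement) =====
-- stated objective: alternative
-- what changed: B replaces A's per-subject set intersections and mutable best-overlap scan by an inverted index (word -> subject positions): overlap counts per subject are accumulated by walking the topic words through the index, the winner is picked as the first position with maximal count, and only the winner's shared words are materialised at the end.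
import Mathlib
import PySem

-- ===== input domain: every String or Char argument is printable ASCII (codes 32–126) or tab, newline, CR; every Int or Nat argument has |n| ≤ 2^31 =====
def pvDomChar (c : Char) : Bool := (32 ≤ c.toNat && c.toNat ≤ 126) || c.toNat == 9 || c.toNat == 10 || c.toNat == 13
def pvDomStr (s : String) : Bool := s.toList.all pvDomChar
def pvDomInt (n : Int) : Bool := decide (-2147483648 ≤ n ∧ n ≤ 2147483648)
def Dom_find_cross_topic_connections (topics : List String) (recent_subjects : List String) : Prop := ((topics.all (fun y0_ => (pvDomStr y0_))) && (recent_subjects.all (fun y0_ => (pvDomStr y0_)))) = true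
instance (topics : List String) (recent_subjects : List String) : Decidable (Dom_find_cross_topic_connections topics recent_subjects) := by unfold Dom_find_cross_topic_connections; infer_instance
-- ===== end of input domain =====

-- B replaces A's per-subject set intersections and mutable best/overlap accumulator by an
-- inverted index (word -> subject positions) plus a count table driven from the topic words;
-- the winner is the first position with maximal count (objective: alternative algorithm, no speed claim).

def pvStopwords : List String :=
  ["the", "a", "an", "to", "for", "of", "and", "or", "in", "on", "is",
   "it", "that", "this", "with", "from", "by", "at", "be", "as", "are",
   "was", "were", "been", "do", "does", "did", "has", "have", "had",
   "will", "would", "could", "should", "may", "might", "can", "test",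
   "build", "create", "make", "use", "get", "set", "new", "add"]

-- ===== PORT A =====
def find_cross_topic_connections (topics : List String) (recent_subjects : List String) : String :=
  if topics.isEmpty || recent_subjects.isEmpty then ""
  else
    let topic_words : PySem.Set String :=
      topics.foldl
        (fun acc t =>
          PySem.Set.union acc
            (PySem.Set.diff (PySem.Set.ofList (PySem.Str.split₀ (PySem.Str.lower t))) pvStopwords))
        PySem.Set.empty
    let subject_words : PySem.Dict String (PySem.Set String) :=
      recent_subjects.foldl
        (fun d s =>
          d.insert s
            (PySem.Set.diff (PySem.Set.ofList (PySem.Str.split₀ (PySem.Str.lower s))) pvStopwords))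
        PySem.Dict.empty
    let best :=
      subject_words.items.foldl
        (fun b p =>
          let overlap := PySem.Set.inter topic_words p.2
          if PySem.Set.len overlap > PySem.Set.len b.2 then (p.1, overlap) else b)
        (("" : String), PySem.Set.empty)
    if best.2 = ([] : List String) then ""
    else
      let shared := PySem.Str.join ", " (PySem.List.slice (PySem.List.sorted best.2 (fun x => x) false) none (some 3))
      "Unexpected connection: your current work shares themes (" ++ shared ++
        ") with a recurring pattern: '" ++ PySem.Str.slice best.1 none (some 60) ++ "'. Worth exploring?"

-- ===== PORT B =====
def find_cross_topic_connections_alt (topics : List String) (recent_subjects : List String) : String :=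
  if topics.isEmpty || recent_subjects.isEmpty then ""
  else
    let topic_words : PySem.Set String :=
      PySem.Set.diff (PySem.Set.ofList (topics.flatMap (fun t => PySem.Str.split₀ (PySem.Str.lower t)))) pvStopwords
    -- index.setdefault(w, []).append(i) is exactly index[w] = index.get(w, []) + [i] (Dict.modify)
    let index : PySem.Dict String (List Int) :=
      (PySem.List.enumerate recent_subjects 0).foldl
        (fun d p =>
          (PySem.List.dedup (PySem.Str.split₀ (PySem.Str.lower p.2))).foldl
            (fun d w => d.modify w [] (fun js => js ++ [p.1])) d)
        PySem.Dict.empty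
    let counts : PySem.Dict Int Int :=
      topic_words.foldl
        (fun c w => (index.getD w []).foldl (fun c i => c.insert i (c.getD i 0 + 1)) c)
        PySem.Dict.empty
    let best_i : Int :=
      (PySem.List.pyRange 1 (PySem.List.len recent_subjects) 1).foldl
        (fun b i => if counts.getD i 0 > counts.getD b 0 then i else b) 0
    if counts.getD best_i 0 = 0 then ""
    else
      let best := PySem.List.pyGetD recent_subjects best_i ""
      let subject_words : PySem.Set String := PySem.Set.ofList (PySem.Str.split₀ (PySem.Str.lower best))
      let shared := PySem.Str.join ", "
        (PySem.List.slice
          (PySem.List.sorted (topic_words.filter (fun w => PySem.Set.contains subject_words w)) (fun x => x) false)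
          none (some 3))
      "Unexpected connection: your current work shares themes (" ++ shared ++
        ") with a recurring pattern: '" ++ PySem.Str.slice best none (some 60) ++ "'. Worth exploring?"

-- ===== PRECONDITION & SPEC =====
def Spec_find_cross_topic_connections (topics : List String) (recent_subjects : List String) (out : String) : Prop := out = find_cross_topic_connections_alt topics recent_subjects
instance (topics : List String) (recent_subjects : List String) (out : String) : Decidable (Spec_find_cross_topic_connections topics recent_subjects out) := by unfold Spec_find_cross_topic_connections; infer_instance

-- ===== CLAIM (what is proved, stated in full; the proofs are below) =====
def Claim_equal_find_cross_topic_connections : Prop := ∀ (topics : List String) (recent_subjects : List String), Dom_find_cross_topic_connections topics recent_subjects → Spec_find_cross_topic_connections topics recent_subjects (find_cross_topic_connections topics recent_subjects)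

-- ===== LEMMAS AND PROOFS =====

def pvWords (s : String) : List String := PySem.Str.split₀ (PySem.Str.lower s)

def pvCW (s : String) : PySem.Set String :=
  PySem.Set.diff (PySem.Set.ofList (pvWords s)) pvStopwords

def pvPairs (l : List String) : List (String × Int) :=
  (PySem.List.enumerate l 0).flatMap (fun p => (PySem.List.dedup (pvWords p.2)).map (fun w => (w, p.1)))

theorem pv_diff_ofList_append {l1 l2 c : List String} :
    PySem.Set.diff (PySem.Set.ofList (l1 ++ l2)) c =
      PySem.Set.union (PySem.Set.diff (PySem.Set.ofList l1) c)
        (PySem.Set.diff (PySem.Set.ofList l2) c) := by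
  have hnd : (PySem.Set.diff (PySem.Set.ofList l2) c).Nodup :=
    PySem.Set.nodup_diff _ _ (PySem.Set.nodup_ofList _)
  rw [PySem.Set.ofList_append]
  unfold PySem.Set.union
  rw [PySem.Set.update_eq_append_filter, PySem.Set.update_eq_append_filter]
  rw [PySem.Set.ofList_eq_self_of_nodup _ hnd]
  unfold PySem.Set.diff
  rw [List.filter_append, List.filter_filter, List.filter_filter]
  congr 1
  apply List.filter_congr
  intro x hx
  simp only [PySem.Set.contains, List.contains_eq_mem, List.mem_filter]
  by_cases h1 : x ∈ PySem.Set.ofList l1 <;> by_cases h2 : x ∈ c <;> simp [h1, h2]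

theorem pv_topic_words_eq (topics : List String) :
    topics.foldl
      (fun acc t =>
        PySem.Set.union acc
          (PySem.Set.diff (PySem.Set.ofList (PySem.Str.split₀ (PySem.Str.lower t))) pvStopwords))
      PySem.Set.empty =
    PySem.Set.diff (PySem.Set.ofList (topics.flatMap (fun t => PySem.Str.split₀ (PySem.Str.lower t)))) pvStopwords := by
  induction topics using List.reverseRecOn with
  | nil => rfl
  | append_singleton l t ih =>
    rw [List.foldl_append, List.flatMap_append, pv_diff_ofList_append, ih]
    simp [List.flatMap]

theorem pv_items_foldl_insert (g : String → PySem.Set String) (l : List String) :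
    (l.foldl (fun d s => d.insert s (g s)) PySem.Dict.empty).items =
      (PySem.List.dedup l).map (fun s => (s, g s)) := by
  induction l using List.reverseRecOn with
  | nil => rfl
  | append_singleton l s ih =>
    rw [List.foldl_append, PySem.List.dedup_eq_ofList, PySem.Set.ofList_append_singleton]
    simp only [List.foldl_cons, List.foldl_nil, PySem.Dict.items_insert]
    have hkeys : (l.foldl (fun d s => d.insert s (g s)) PySem.Dict.empty).keys = PySem.Set.ofList l := by
      rw [PySem.Dict.keys_foldl_insert]
      rfl
    by_cases hs : s ∈ PySem.Set.ofList l
    · have hc : (l.foldl (fun d s => d.insert s (g s)) PySem.Dict.empty).contains s = true := by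
        rw [PySem.Dict.contains_iff_mem_keys, hkeys]; exact hs
      rw [if_pos hc, ih, PySem.Set.add_of_mem hs, PySem.List.dedup_eq_ofList, List.map_map]
      apply List.map_congr_left
      intro x hx
      by_cases hxs : x = s <;> simp [hxs]
    · have hc : (l.foldl (fun d s => d.insert s (g s)) PySem.Dict.empty).contains s = false := by
        rw [Bool.eq_false_iff]
        intro h
        exact hs ((PySem.Dict.contains_iff_mem_keys _ _).mp h |> (hkeys ▸ ·))
      rw [if_neg (by simp [hc]), ih, PySem.Set.add_of_not_mem hs, PySem.List.dedup_eq_ofList, List.map_append]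
      rfl

theorem pv_index_getD (l : List String) (w : String) :
    ((PySem.List.enumerate l 0).foldl
        (fun d p =>
          (PySem.List.dedup (pvWords p.2)).foldl
            (fun d w' => d.modify w' [] (fun js => js ++ [p.1])) d)
        (PySem.Dict.empty : PySem.Dict String (List Int))).getD w []
      = ((pvPairs l).filter (fun q => q.1 == w)).map (·.2) := by
  have h1 : (PySem.List.enumerate l 0).foldl
        (fun d p =>
          (PySem.List.dedup (pvWords p.2)).foldl
            (fun d w' => d.modify w' [] (fun js => js ++ [p.1])) d)
        (PySem.Dict.empty : PySem.Dict String (List Int))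
      = (pvPairs l).foldl (fun d q => d.modify q.1 [] (fun js => js ++ [q.2])) PySem.Dict.empty := by
    rw [pvPairs, List.foldl_flatMap]
    apply PySem.List.foldl_congr_mem
    intro acc p _
    rw [List.foldl_map]
  rw [h1, PySem.Dict.getD_foldl_modify_append, PySem.Dict.getD_empty, List.nil_append]

theorem pv_pairs_count (l : List String) (w : String) (i : Int) :
    ((((pvPairs l).filter (fun q => q.1 == w)).map (·.2)).count i : Nat)
      = if 0 ≤ i ∧ i < (l.length : Int) ∧ w ∈ pvWords (l.getD i.toNat "") then 1 else 0 := by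
  induction l using List.reverseRecOn with
  | nil =>
    simp only [pvPairs, PySem.List.enumerate_nil, List.flatMap_nil, List.filter_nil,
      List.map_nil, List.count_nil]
    rw [if_neg]
    rintro ⟨h1, h2, -⟩
    simp at h2
    omega
  | append_singleton l s ih =>
    have hpp : pvPairs (l ++ [s])
        = pvPairs l ++ (PySem.List.dedup (pvWords s)).map (fun w' => (w', (l.length : Int))) := by
      simp only [pvPairs, PySem.List.enumerate_append, List.flatMap_append,
        PySem.List.enumerate_cons, PySem.List.enumerate_nil, List.flatMap_cons, List.flatMap_nil,
        List.append_nil, zero_add]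
    rw [hpp, List.filter_append, List.map_append, List.count_append, ih]
    have hnew : (((PySem.List.dedup (pvWords s)).map (fun w' => (w', (l.length : Int)))).filter
          (fun q => q.1 == w)).map (·.2)
        = List.replicate (if w ∈ pvWords s then 1 else 0) (l.length : Int) := by
      rw [List.filter_map]
      have hco : ((PySem.List.dedup (pvWords s)).filter
            ((fun q => q.1 == w) ∘ (fun w' => (w', (l.length : Int)))))
          = (PySem.List.dedup (pvWords s)).filter (fun w' => w' == w) := rfl
      rw [hco, List.filter_beq]
      have hcnt : (PySem.List.dedup (pvWords s)).count w = if w ∈ pvWords s then 1 else 0 := by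
        rw [PySem.List.dedup_eq_ofList]
        by_cases hm : w ∈ pvWords s
        · rw [if_pos hm]
          exact List.count_eq_one_of_mem (PySem.Set.nodup_ofList _) ((PySem.Set.mem_ofList _ _).mpr hm)
        · rw [if_neg hm]
          exact List.count_eq_zero.mpr (fun h => hm ((PySem.Set.mem_ofList _ _).mp h))
      rw [hcnt]
      by_cases hm : w ∈ pvWords s <;> simp [hm]
    rw [hnew, List.count_replicate]
    by_cases h1 : 0 ≤ i
    · rcases lt_trichotomy i (l.length : Int) with h2 | h2 | h2
      · have htn : i.toNat < l.length := by omega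
        have hget : (l ++ [s]).getD i.toNat "" = l.getD i.toNat "" :=
          List.getD_append _ _ _ _ htn
        have hne : ((l.length : Int) == i) = false := by simp; omega
        have hlen : i < ((l ++ [s]).length : Int) := by simp; omega
        rw [hne, hget]
        simp only [Bool.false_eq_true, if_false, add_zero]
        have hle : i ≤ (l.length : Int) := le_of_lt h2
        simp [h1, h2, hlen, hle]
      · have htn : i.toNat = l.length := by omega
        have hget : (l ++ [s]).getD i.toNat "" = s := by
          rw [htn, List.getD_append_right _ _ _ _ (le_refl _)]
          simp
        have heq : ((l.length : Int) == i) = true := by simp; omega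
        have hlen : i < ((l ++ [s]).length : Int) := by simp; omega
        rw [heq, hget]
        have hold : ¬ (0 ≤ i ∧ i < (l.length : Int) ∧ w ∈ pvWords (l.getD i.toNat "")) := by
          rintro ⟨-, hh, -⟩; omega
        rw [if_neg hold, Nat.zero_add]
        have hle : i ≤ (l.length : Int) := le_of_eq h2
        by_cases hm : w ∈ pvWords s <;> simp [hm, h1, hlen, hle]
      · have hne : ((l.length : Int) == i) = false := by simp; omega
        have hold : ¬ (0 ≤ i ∧ i < (l.length : Int) ∧ w ∈ pvWords (l.getD i.toNat "")) := by
          rintro ⟨-, hh, -⟩; omega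
        have hnew2 : ¬ (0 ≤ i ∧ i < ((l ++ [s]).length : Int) ∧ w ∈ pvWords ((l ++ [s]).getD i.toNat "")) := by
          rintro ⟨-, hh, -⟩; simp at hh; omega
        rw [hne, if_neg hold, if_neg hnew2]
        simp
    · have hne : ((l.length : Int) == i) = false := by simp; omega
      have hold : ¬ (0 ≤ i ∧ i < (l.length : Int) ∧ w ∈ pvWords (l.getD i.toNat "")) := by
        rintro ⟨hh, -, -⟩; omega
      have hnew2 : ¬ (0 ≤ i ∧ i < ((l ++ [s]).length : Int) ∧ w ∈ pvWords ((l ++ [s]).getD i.toNat "")) := by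
        rintro ⟨hh, -, -⟩; omega
      rw [hne, if_neg hold, if_neg hnew2]
      simp

theorem pv_counts_getD (tw : List String) (index : PySem.Dict String (List Int)) (i : Int) :
    (tw.foldl (fun c w => (index.getD w []).foldl (fun c j => c.insert j (c.getD j 0 + 1)) c)
        (PySem.Dict.empty : PySem.Dict Int Int)).getD i 0
      = ((tw.flatMap (fun w => index.getD w [])).count i : Int) := by
  rw [← List.foldl_flatMap, PySem.Dict.getD_foldl_insert_add_one, PySem.Dict.getD_empty, zero_add]

theorem pv_sum_map_ite {α : Type} (p : α → Prop) [DecidablePred p] (l : List α) :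
    (l.map (fun x => if p x then 1 else 0)).sum = l.countP (fun x => decide (p x)) := by
  induction l with
  | nil => rfl
  | cons x xs ih =>
    simp only [List.map_cons, List.sum_cons, List.countP_cons, ih]
    by_cases h : p x <;> simp [h] <;> omega

theorem pv_inter_len (X : List String) (s : String) :
    (PySem.Set.inter (PySem.Set.diff (PySem.Set.ofList X) pvStopwords) (pvCW s)).length
      = (PySem.Set.diff (PySem.Set.ofList X) pvStopwords).countP (fun w => decide (w ∈ pvWords s)) := by
  unfold PySem.Set.inter
  rw [← List.countP_eq_length_filter]
  apply List.countP_congr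
  intro w hw
  have hns : w ∉ pvStopwords := by
    have h : w ∈ PySem.Set.diff (PySem.Set.ofList X) pvStopwords := hw
    rw [PySem.Set.mem_diff] at h
    exact h.2
  simp only [PySem.Set.contains, List.contains_eq_mem, decide_eq_true_eq, pvCW]
  simp [PySem.Set.mem_diff, PySem.Set.mem_ofList, hns]

theorem pv_filter_subject (X : List String) (s : String) :
    (PySem.Set.diff (PySem.Set.ofList X) pvStopwords).filter
        (fun w => PySem.Set.contains (PySem.Set.ofList (pvWords s)) w)
      = PySem.Set.inter (PySem.Set.diff (PySem.Set.ofList X) pvStopwords) (pvCW s) := by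
  unfold PySem.Set.inter
  apply List.filter_congr
  intro w hw
  have hns : w ∉ pvStopwords := by
    have h : w ∈ PySem.Set.diff (PySem.Set.ofList X) pvStopwords := hw
    rw [PySem.Set.mem_diff] at h
    exact h.2
  simp only [PySem.Set.contains, List.contains_eq_mem, pvCW]
  simp [PySem.Set.mem_diff, PySem.Set.mem_ofList, hns]

theorem pv_idx_scan (F : Int → Int) (n : Nat) (hn : 0 < n) :
    ∃ b : Nat, b < n ∧
      (PySem.List.pyRange 1 (n : Int) 1).foldl (fun bi i => if F i > F bi then i else bi) 0 = (b : Int) ∧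
      (∀ k : Nat, k < n → F k ≤ F b) ∧ (∀ k : Nat, k < b → F k < F b) := by
  induction n with
  | zero => exact absurd hn (by omega)
  | succ m ih =>
    by_cases hm : m = 0
    · subst hm
      refine ⟨0, Nat.zero_lt_one, ?_, ?_, fun k hk => absurd hk (by omega)⟩
      · rw [show (((0 : Nat) + 1 : Nat) : Int) = 1 by norm_num,
          PySem.List.pyRange_one_eq_nil (le_refl 1)]
        rfl
      · intro k hk
        have hk0 : k = 0 := by omega
        subst hk0
        exact le_refl _
    · obtain ⟨b, hb, hscan, hmax, hfirst⟩ := ih (by omega)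
      have hc : ((m + 1 : Nat) : Int) = (m : Int) + 1 := by push_cast; ring
      rw [hc, PySem.List.pyRange_one_succ_right (by exact_mod_cast Nat.one_le_iff_ne_zero.mpr hm),
        List.foldl_append, hscan]
      simp only [List.foldl_cons, List.foldl_nil]
      by_cases hgt : F m > F b
      · refine ⟨m, by omega, by rw [if_pos hgt], ?_, ?_⟩
        · intro k hk
          rcases Nat.lt_succ_iff_lt_or_eq.mp hk with h | h
          · exact le_of_lt (lt_of_le_of_lt (hmax k h) hgt)
          · subst h; exact le_refl _
        · intro k hk
          exact lt_of_le_of_lt (hmax k hk) hgt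
      · refine ⟨b, by omega, by rw [if_neg hgt], ?_, hfirst⟩
        intro k hk
        rcases Nat.lt_succ_iff_lt_or_eq.mp hk with h | h
        · exact hmax k h
        · subst h; omega

theorem pv_ded_scan (g : String → List String) :
    ∀ (l : List String), l ≠ [] →
    ∃ b : Nat, b < l.length ∧
      (∀ k, k < l.length → (g (l.getD k "")).length ≤ (g (l.getD b "")).length) ∧
      (∀ k, k < b → (g (l.getD k "")).length < (g (l.getD b "")).length) ∧
      ((PySem.List.dedup l).foldl
          (fun acc s => if PySem.Set.len (g s) > PySem.Set.len acc.2 then (s, g s) else acc)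
          (("" : String), ([] : List String))
        = if (g (l.getD b "")).length = 0 then (("" : String), ([] : List String))
          else (l.getD b "", g (l.getD b ""))) := by
  intro l
  induction l using List.reverseRecOn with
  | nil => intro h; exact absurd rfl h
  | append_singleton l s ih =>
    intro _
    by_cases hnil : l = []
    · subst hnil
      refine ⟨0, by simp, ?_, by omega, ?_⟩
      · intro k hk
        simp only [List.nil_append, List.length_cons, List.length_nil] at hk
        have hk0 : k = 0 := by omega
        subst hk0
        exact le_refl _
      · have hd : PySem.List.dedup ([] ++ [s] : List String) = [s] := rfl
        rw [hd]
        simp only [List.foldl_cons, List.foldl_nil, List.nil_append, List.getD_cons_zero]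
        by_cases h0 : (g s).length = 0
        · rw [if_pos h0, if_neg]
          simp only [PySem.Set.len, gt_iff_lt]
          omega
        · rw [if_pos, if_neg h0]
          simp only [PySem.Set.len, gt_iff_lt]
          simp only [List.length_nil]
          omega
    · obtain ⟨b, hb, hmax, hfirst, hfold⟩ := ih hnil
      have hgb : (l ++ [s]).getD b "" = l.getD b "" := List.getD_append _ _ _ _ hb
      have hgk : ∀ k, k < l.length → (l ++ [s]).getD k "" = l.getD k "" :=
        fun k hk => List.getD_append _ _ _ _ hk
      have hgn : (l ++ [s]).getD l.length "" = s := by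
        rw [List.getD_append_right _ _ _ _ (le_refl _)]
        simp
      by_cases hs : s ∈ l
      · have hdun : PySem.List.dedup (l ++ [s]) = PySem.List.dedup l := by
          rw [PySem.List.dedup_eq_ofList, PySem.Set.ofList_append_singleton,
            PySem.Set.add_of_mem ((PySem.Set.mem_ofList _ _).mpr hs), ← PySem.List.dedup_eq_ofList]
        obtain ⟨j, hj, hjs⟩ := List.getElem_of_mem hs
        have hsv : (g s).length ≤ (g (l.getD b "")).length := by
          have h := hmax j hj
          rwa [List.getD_eq_getElem _ _ hj, hjs] at h
        refine ⟨b, by simp; omega, ?_, ?_, ?_⟩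
        · intro k hk
          rw [hgb]
          simp only [List.length_append, List.length_cons, List.length_nil] at hk
          rcases (by omega : k < l.length ∨ k = l.length) with h | h
          · rw [hgk k h]; exact hmax k h
          · rw [h, hgn]; exact hsv
        · intro k hk
          rw [hgb, hgk k (by omega)]
          exact hfirst k hk
        · rw [hdun, hfold, hgb]
      · have hdun : PySem.List.dedup (l ++ [s]) = PySem.List.dedup l ++ [s] := by
          rw [PySem.List.dedup_eq_ofList, PySem.Set.ofList_append_singleton,
            PySem.Set.add_of_not_mem (fun h => hs ((PySem.Set.mem_ofList _ _).mp h)),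
            ← PySem.List.dedup_eq_ofList]
        rw [hdun, List.foldl_append, hfold]
        simp only [List.foldl_cons, List.foldl_nil]
        by_cases hgt : (g (l.getD b "")).length < (g s).length
        · refine ⟨l.length, by simp, ?_, ?_, ?_⟩
          · intro k hk
            rw [hgn]
            simp only [List.length_append, List.length_cons, List.length_nil] at hk
            rcases (by omega : k < l.length ∨ k = l.length) with h | h
            · rw [hgk k h]; exact le_of_lt (lt_of_le_of_lt (hmax k h) hgt)
            · rw [h, hgn]
          · intro k hk
            rw [hgn, hgk k hk]
            exact lt_of_le_of_lt (hmax k hk) hgt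
          · rw [hgn]
            by_cases h0 : (g (l.getD b "")).length = 0
            · rw [if_pos h0, if_pos, if_neg (by omega)]
              simp only [PySem.Set.len, gt_iff_lt]
              simp only [List.length_nil]
              omega
            · rw [if_neg h0, if_pos, if_neg (by omega)]
              simp only [PySem.Set.len, gt_iff_lt]
              omega
        · refine ⟨b, by simp; omega, ?_, ?_, ?_⟩
          · intro k hk
            rw [hgb]
            simp only [List.length_append, List.length_cons, List.length_nil] at hk
            rcases (by omega : k < l.length ∨ k = l.length) with h | h
            · rw [hgk k h]; exact hmax k h
            · rw [h, hgn]; omega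
          · intro k hk
            rw [hgb, hgk k (by omega)]
            exact hfirst k hk
          · rw [hgb]
            by_cases h0 : (g (l.getD b "")).length = 0
            · rw [if_pos h0, if_neg]
              simp only [PySem.Set.len, gt_iff_lt]
              simp only [List.length_nil]
              omega
            · rw [if_neg h0, if_neg]
              simp only [PySem.Set.len, gt_iff_lt]
              omega

-- ===== VERDICT (by name: the statement is the Claim_ definition above) =====
theorem find_cross_topic_connections_spec : Claim_equal_find_cross_topic_connections := by
  intro topics l _dom
  unfold Spec_find_cross_topic_connections
  unfold find_cross_topic_connections find_cross_topic_connections_alt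
  by_cases hg : (topics.isEmpty || l.isEmpty) = true
  · rw [if_pos hg, if_pos hg]
  · rw [if_neg hg, if_neg hg]
    have hlne : l ≠ [] := by
      intro h
      subst h
      simp at hg
    have hlpos : 0 < l.length := List.length_pos_iff.mpr hlne
    simp only [pv_topic_words_eq, PySem.List.len_eq]
    simp only [PySem.Set.empty]
    rw [pv_items_foldl_insert
        (fun s => PySem.Set.diff (PySem.Set.ofList (PySem.Str.split₀ (PySem.Str.lower s))) pvStopwords) l,
      List.foldl_map]
    set T : List String :=
      PySem.Set.diff (PySem.Set.ofList (topics.flatMap (fun t => PySem.Str.split₀ (PySem.Str.lower t)))) pvStopwords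
      with hT
    set IDX : PySem.Dict String (List Int) :=
      (PySem.List.enumerate l 0).foldl
        (fun d p =>
          (PySem.List.dedup (PySem.Str.split₀ (PySem.Str.lower p.2))).foldl
            (fun d w => d.modify w [] (fun js => js ++ [p.1])) d)
        PySem.Dict.empty
      with hIDX
    set CNT : PySem.Dict Int Int :=
      T.foldl (fun c w => (IDX.getD w []).foldl (fun c i => c.insert i (c.getD i 0 + 1)) c) PySem.Dict.empty
      with hCNT
    obtain ⟨bA, hbA, hmaxA, hfirstA, hfoldA⟩ :=
      pv_ded_scan
        (fun s => PySem.Set.inter T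
          (PySem.Set.diff (PySem.Set.ofList (PySem.Str.split₀ (PySem.Str.lower s))) pvStopwords)) l hlne
    obtain ⟨bB, hbB, hscanB, hmaxB, hfirstB⟩ := pv_idx_scan (fun i => CNT.getD i 0) l.length hlpos
    have hVeq : ∀ k : Nat, k < l.length →
        CNT.getD (k : Int) 0
          = ((PySem.Set.inter T
              (PySem.Set.diff (PySem.Set.ofList (PySem.Str.split₀ (PySem.Str.lower (l.getD k ""))))
                pvStopwords)).length : Int) := by
      intro k hk
      rw [hCNT, pv_counts_getD, List.count_flatMap]
      have hstep : ∀ w ∈ T, (List.count (k : Int) ∘ fun w => IDX.getD w []) w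
          = if w ∈ PySem.Str.split₀ (PySem.Str.lower (l.getD k "")) then 1 else 0 := by
        intro w _
        have h3 := pv_index_getD l w
        simp only [pvWords] at h3
        rw [← hIDX] at h3
        have h4 := pv_pairs_count l w (k : Int)
        simp only [pvWords] at h4
        simp only [Function.comp_apply, h3, h4]
        simp [hk]
      rw [List.map_congr_left hstep,
        pv_sum_map_ite (fun w => w ∈ PySem.Str.split₀ (PySem.Str.lower (l.getD k ""))) T]
      have h5 := pv_inter_len (topics.flatMap (fun t => PySem.Str.split₀ (PySem.Str.lower t))) (l.getD k "")
      simp only [pvCW, pvWords] at h5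
      rw [← hT] at h5
      exact_mod_cast h5.symm
    have hbeq : bA = bB := by
      rcases lt_trichotomy bA bB with hlt | he | hgt2
      · exfalso
        have h1 := hfirstB bA hlt
        rw [hVeq bA (lt_trans hlt hbB), hVeq bB hbB] at h1
        have h2 := hmaxA bB hbB
        omega
      · exact he
      · exfalso
        have h1 := hmaxB bA hbA
        rw [hVeq bA hbA, hVeq bB hbB] at h1
        have h2 := hfirstA bB hgt2
        omega
    subst hbeq
    rw [hscanB]
    dsimp only
    rw [hfoldA]
    have hG := hVeq bA hbA
    by_cases h0 : (PySem.Set.inter T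
        (PySem.Set.diff (PySem.Set.ofList (PySem.Str.split₀ (PySem.Str.lower (l.getD bA ""))))
          pvStopwords)).length = 0
    · rw [if_pos h0]
      have hg0 : CNT.getD (bA : Int) 0 = 0 := by
        rw [hG]
        exact_mod_cast h0
      rw [if_pos hg0, if_pos (rfl : ((("" : String), ([] : List String)) : String × List String).2 = [])]
    · rw [if_neg h0]
      have hgne : ¬ CNT.getD (bA : Int) 0 = 0 := by
        rw [hG]
        exact_mod_cast h0
      rw [if_neg hgne]
      have hGne : PySem.Set.inter T
          (PySem.Set.diff (PySem.Set.ofList (PySem.Str.split₀ (PySem.Str.lower (l.getD bA ""))))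
            pvStopwords) ≠ ([] : List String) := by
        intro h
        exact h0 (by rw [h]; rfl)
      rw [if_neg hGne]
      simp only [PySem.List.pyGetD_natCast]
      have h6 := pv_filter_subject (topics.flatMap (fun t => PySem.Str.split₀ (PySem.Str.lower t))) (l.getD bA "")
      simp only [pvCW, pvWords] at h6
      rw [← hT] at h6
      rw [h6]
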